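-- pv_equiv track=rewrite | github.com/aniketpoojari/Enterprise-AI-Assistant-MCP | services/report_service.py | _extract_quality_notes
-- ===== SOURCE A (Python) =====
-- from typing import Any, Dict, List
--
-- def _extract_quality_notes(
--     markdown: str, rows: List, columns: List
-- ) -> List[str]:
--     """Generate data quality notes."""
--     notes = []
--
--     if not rows:
--         notes.append("No data returned for this query.")
--     elif len(rows) >= 100:
--         notes.append(
--             "Results were truncated to 100 rows. The full dataset may contain more records."
--         )
--
--     # Check for NULL values
--     if rows and isinstance(rows[0], dict):
--         for col in columns:
--             null_count = sum(1 for row in rows if row.get(col) is None)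
--             if null_count > 0:
--                 notes.append(
--                     f"Column '{col}' has {null_count} NULL values ({null_count}/{len(rows)} rows)."
--                 )
--
--     return notes
-- ===== SOURCE B (Python) =====
-- def _extract_quality_notes(markdown, rows, columns):
--     """Generate data quality notes (single tallying pass over rows)."""
--     notes = []
--     if not rows:
--         notes.append("No data returned for this query.")
--     elif len(rows) >= 100:
--         notes.append(
--             "Results were truncated to 100 rows. The full dataset may contain more records."
--         )
--     if rows and isinstance(rows[0], dict):
--         uniq = list(dict.fromkeys(columns))
--         counts = {}
--         for row in rows:
--             for col in uniq:
--                 if row.get(col) is None: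
--                     counts[col] = counts.get(col, 0) + 1
--         total = len(rows)
--         for col in columns:
--             c = counts.get(col, 0)
--             if c > 0:
--                 notes.append(
--                     f"Column '{col}' has {c} NULL values ({c}/{total} rows)."
--                 )
--     return notes
-- ===== Notes on version B (the rewrite author's own statement) =====
-- stated objective: faster
-- what changed: Replaces A's per-column re-scan of all rows with a single row-major tallying pass that maintains a per-column counter dict keyed by the distinct columns, then emits the notes in one pass over columns.
import Mathlib
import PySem

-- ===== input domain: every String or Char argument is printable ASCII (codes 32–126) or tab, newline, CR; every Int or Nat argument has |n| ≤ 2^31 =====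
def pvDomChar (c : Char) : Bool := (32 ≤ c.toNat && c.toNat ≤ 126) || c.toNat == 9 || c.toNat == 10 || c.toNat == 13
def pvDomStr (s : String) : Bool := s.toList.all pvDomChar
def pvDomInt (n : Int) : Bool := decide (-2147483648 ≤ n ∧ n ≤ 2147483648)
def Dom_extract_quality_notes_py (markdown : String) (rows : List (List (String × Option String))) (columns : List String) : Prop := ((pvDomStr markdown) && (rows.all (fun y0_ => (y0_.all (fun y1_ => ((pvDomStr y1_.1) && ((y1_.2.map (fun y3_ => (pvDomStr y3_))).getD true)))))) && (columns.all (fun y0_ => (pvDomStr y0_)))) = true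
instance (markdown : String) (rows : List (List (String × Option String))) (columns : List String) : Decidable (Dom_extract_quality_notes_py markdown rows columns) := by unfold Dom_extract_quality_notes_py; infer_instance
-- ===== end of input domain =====

-- B replaces A's per-column re-scan of the rows by one tallying pass over the rows that
-- maintains a counter dict keyed by the distinct columns; same cost class, different traversal.

-- `row.get(col) is None` (true when the key is absent or its value is None)
def rowGetIsNone (row : List (String × Option String)) (col : String) : Bool :=
  ((PySem.Dict.mk row).getD col none).isNone

-- the f-string of the NULL note
def nullNote (col : String) (n total : Int) : String :=
  "Column '" ++ col ++ "' has " ++ PySem.Int.toStr n ++ " NULL values (" ++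
    PySem.Int.toStr n ++ "/" ++ PySem.Int.toStr total ++ " rows)."

-- ===== PORT A =====
def extract_quality_notes_py (markdown : String) (rows : List (List (String × Option String))) (columns : List String) : List String :=
  let notes : List String :=
    if rows = [] then ["No data returned for this query."]
    else if 100 ≤ rows.length then
      ["Results were truncated to 100 rows. The full dataset may contain more records."]
    else []
  if rows = [] then notes
  else
    -- for col in columns: null_count = sum(1 for row in rows if row.get(col) is None); …
    columns.foldl (fun notes col =>
      let null_count : Int :=
        rows.foldl (fun s row => if rowGetIsNone row col then s + 1 else s) 0
      if 0 < null_count then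
        notes ++ [nullNote col null_count (rows.length : Int)]
      else notes) notes

-- ===== PORT B =====
def extract_quality_notes_py_alt (markdown : String) (rows : List (List (String × Option String))) (columns : List String) : List String :=
  let notes : List String :=
    if rows = [] then ["No data returned for this query."]
    else if 100 ≤ rows.length then
      ["Results were truncated to 100 rows. The full dataset may contain more records."]
    else []
  if rows = [] then notes
  else
    let uniq := PySem.List.dedup columns
    -- for row in rows: for col in uniq: if row.get(col) is None: counts[col] = counts.get(col, 0) + 1
    let counts : PySem.Dict String Int :=
      rows.foldl (fun d row =>
        uniq.foldl (fun d col =>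
          if rowGetIsNone row col then d.insert col (d.getD col 0 + 1) else d) d)
        PySem.Dict.empty
    let total : Int := rows.length
    columns.foldl (fun notes col =>
      let c := counts.getD col 0
      if 0 < c then notes ++ [nullNote col c total] else notes) notes

-- ===== PRECONDITION & SPEC =====
def Spec_extract_quality_notes_py (markdown : String) (rows : List (List (String × Option String))) (columns : List String) (out : List String) : Prop := out = extract_quality_notes_py_alt markdown rows columns
instance (markdown : String) (rows : List (List (String × Option String))) (columns : List String) (out : List String) : Decidable (Spec_extract_quality_notes_py markdown rows columns out) := by unfold Spec_extract_quality_notes_py; infer_instance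

-- ===== CLAIM (what is proved, stated in full; the proofs are below) =====
def Claim_equal_extract_quality_notes_py : Prop := ∀ (markdown : String) (rows : List (List (String × Option String))) (columns : List String), Dom_extract_quality_notes_py markdown rows columns → Spec_extract_quality_notes_py markdown rows columns (extract_quality_notes_py markdown rows columns)

-- ===== LEMMAS AND PROOFS =====

-- B's counter, for a column occurring in `uniq`, holds exactly the null count of A's inner scan.
lemma counts_getD (rows : List (List (String × Option String))) (uniq : List String)
    (hnd : uniq.Nodup) (col : String) (hmem : col ∈ uniq)
    (d : PySem.Dict String Int) :
    (rows.foldl (fun d row =>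
        uniq.foldl (fun d col =>
          if rowGetIsNone row col then d.insert col (d.getD col 0 + 1) else d) d) d).getD col 0
      = d.getD col 0 + (rows.countP (fun row => rowGetIsNone row col) : Int) := by
  induction rows generalizing d with
  | nil => simp
  | cons row rest ih =>
    simp only [List.foldl_cons, ih]
    rw [PySem.List.foldl_if_eq_foldl_filter, PySem.Dict.getD_foldl_insert_add_one]
    by_cases h : rowGetIsNone row col
    · have h1 : (uniq.filter (fun c => rowGetIsNone row c)).count col = 1 := by
        rw [List.count_filter h, List.count_eq_one_of_mem hnd hmem]
      rw [h1, List.countP_cons]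
      simp [h]; ring
    · have h1 : (uniq.filter (fun c => rowGetIsNone row c)).count col = 0 := by
        rw [List.count_eq_zero]
        simp [List.mem_filter, h]
      rw [h1, List.countP_cons]
      simp [h]

theorem extract_quality_notes_py_equal (markdown : String)
    (rows : List (List (String × Option String))) (columns : List String) :
    extract_quality_notes_py markdown rows columns
      = extract_quality_notes_py_alt markdown rows columns := by
  unfold extract_quality_notes_py extract_quality_notes_py_alt
  by_cases hrows : rows = []
  · simp [hrows]
  · simp only [if_neg hrows]
    apply PySem.List.foldl_congr_mem
    intro acc col hcol
    have hc : (rows.foldl (fun d row =>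
        (PySem.List.dedup columns).foldl (fun d col =>
          if rowGetIsNone row col then d.insert col (d.getD col 0 + 1) else d) d)
        PySem.Dict.empty).getD col 0
        = (rows.countP (fun row => rowGetIsNone row col) : Int) := by
      rw [counts_getD rows (PySem.List.dedup columns) (PySem.List.nodup_dedup columns) col
        ((PySem.List.mem_dedup columns col).mpr hcol) PySem.Dict.empty]
      simp [PySem.Dict.empty, PySem.Dict.getD, PySem.Dict.get?]
    simp only [PySem.List.foldl_if_add_one, hc, zero_add]

-- ===== VERDICT (by name: the statement is the Claim_ definition above) =====
theorem extract_quality_notes_py_spec : Claim_equal_extract_quality_notes_py := by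
  intro markdown rows columns _
  exact extract_quality_notes_py_equal markdown rows columns
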